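-- pv_equiv track=rewrite | github.com/ZWZfriso/Leetcode | 1111.py | goroad
-- ===== SOURCE A (Python) =====
-- def goroad(road: list, curp: list, direc: int):
--     left, right = curp[0], curp[1]
--     if direc == 2:
--         while right >= 0:
--             if road[left][right] == '#':
--                 break
--             right -= 1
--         return [left, right + 1]
--     elif direc == 3:
--         while right < len(road[0]):
--             if road[left][right] == '#':
--                 break
--             right += 1
--         return [left, right - 1]
--     elif direc == 0:
--         while left >= 0:
--             if road[left][right] == '#':
--                 break
--             left -= 1
--         return [left + 1, right]
--     elif direc == 1:
--         while left < len(road):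
--             if road[left][right] == '#':
--                 break
--             left += 1
--         return [left - 1, right]
-- ===== SOURCE B (Python) =====
-- def goroad(road: list, curp: list, direc: int):
--     if direc not in (0, 1, 2, 3):
--         return None
--     r, c = curp[0], curp[1]
--     vertical = direc in (0, 1)
--     lane = ''.join(row[c] for row in road) if vertical else road[r]
--     pos = r if vertical else c
--     backward = direc in (0, 2)
--     if backward:
--         lane, pos = lane[::-1], len(lane) - 1 - pos
--     i = lane.find('#', pos)
--     last = (i if i != -1 else len(lane)) - 1
--     if backward:
--         last = len(lane) - 1 - last
--     return [last, c] if vertical else [r, last]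
-- ===== Notes on version B (the rewrite author's own statement) =====
-- stated objective: alternative
-- what changed: Instead of A's four branch-specific cell-by-cell while loops, B materialises the whole lane (the row, or the column joined into a string), reduces the two backward directions to the forward one by reversing the lane and reflecting the position, locates the wall with a single str.find('#', pos), and computes the answer by index arithmetic.
-- outside the precondition, e.g. on goroad(['a', 'bc'], [1, 0], 3): A returns [1, 0], B returns [1, 1]; on goroad(['a', 'bc'], [1, 1], 1): A returns [1, 1], B raises IndexError; on goroad(['ab', 'cd'], [0, -1], 0): A returns [0, -1], B returns [0, -1]
import Mathlib
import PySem

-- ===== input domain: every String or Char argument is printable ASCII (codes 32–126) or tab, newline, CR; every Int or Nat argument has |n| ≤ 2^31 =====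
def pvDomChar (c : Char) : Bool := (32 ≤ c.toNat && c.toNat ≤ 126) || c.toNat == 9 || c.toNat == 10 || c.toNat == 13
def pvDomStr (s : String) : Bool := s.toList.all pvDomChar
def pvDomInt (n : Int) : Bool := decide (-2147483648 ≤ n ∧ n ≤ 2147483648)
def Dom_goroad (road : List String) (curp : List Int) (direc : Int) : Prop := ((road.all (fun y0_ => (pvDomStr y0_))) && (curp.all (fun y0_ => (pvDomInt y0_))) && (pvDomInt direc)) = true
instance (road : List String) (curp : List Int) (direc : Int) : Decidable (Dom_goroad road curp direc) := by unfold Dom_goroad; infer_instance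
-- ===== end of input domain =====

-- B replaces A's four branch-specific while loops by lane extraction + reversal reduction + a single string find (alternative decomposition, same cost).


-- shared primitive: Python's road[l][r] (negative indices wrap; none = IndexError)
def cell (road : List String) (l r : Int) : Option Char :=
  (PySem.List.pyGet? road l).bind (fun s => PySem.Str.pyGet? s r)

-- ===== PORT A =====
-- A's four direction-specific while loops, each returning the stopping index (none = IndexError of
-- road[l][r]); the Nat argument is fuel, always called with enough for every iteration of the loop.
def goLeftA (road : List String) (l : Int) : Nat → Int → Option Int
  | 0, r => some r
  | fuel + 1, r =>
    if 0 ≤ r then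
      match cell road l r with
      | none => none
      | some ch => if ch = '#' then some r else goLeftA road l fuel (r - 1)
    else some r

def goRightA (road : List String) (cols l : Int) : Nat → Int → Option Int
  | 0, r => some r
  | fuel + 1, r =>
    if r < cols then
      match cell road l r with
      | none => none
      | some ch => if ch = '#' then some r else goRightA road cols l fuel (r + 1)
    else some r

def goUpA (road : List String) (r : Int) : Nat → Int → Option Int
  | 0, l => some l
  | fuel + 1, l =>
    if 0 ≤ l then
      match cell road l r with
      | none => none
      | some ch => if ch = '#' then some l else goUpA road r fuel (l - 1)
    else some l

def goDownA (road : List String) (rows r : Int) : Nat → Int → Option Int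
  | 0, l => some l
  | fuel + 1, l =>
    if l < rows then
      match cell road l r with
      | none => none
      | some ch => if ch = '#' then some l else goDownA road rows r fuel (l + 1)
    else some l

def goroad (road : List String) (curp : List Int) (direc : Int) : Option (List Int) :=
  match PySem.List.pyGet? curp 0, PySem.List.pyGet? curp 1 with
  | some left, some right =>
    if direc = 2 then (goLeftA road left ((right + 1).toNat + 1) right).map (fun r => [left, r + 1])
    else if direc = 3 then
      match road with
      | [] => none   -- len(road[0]) raises IndexError
      | r0 :: _ =>
        (goRightA road ((r0.toList.length : Int)) left (((r0.toList.length : Int) - right).toNat + 1) right).map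
          (fun r => [left, r - 1])
    else if direc = 0 then (goUpA road right ((left + 1).toNat + 1) left).map (fun l => [l + 1, right])
    else if direc = 1 then
      (goDownA road ((road.length : Int)) right (((road.length : Int) - left).toNat + 1) left).map
        (fun l => [l - 1, right])
    else none
  | _, _ => none   -- curp[0] / curp[1] raises IndexError

-- ===== PORT B =====
-- B: extract the lane (row, or column via join of row[c]), reflect for the two backward
-- directions, locate the wall with one find('#', pos), and undo the reflection by arithmetic.
def goroad_alt (road : List String) (curp : List Int) (direc : Int) : Option (List Int) :=
  if direc = 0 ∨ direc = 1 ∨ direc = 2 ∨ direc = 3 then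
    match PySem.List.pyGet? curp 0 with
    | none => none   -- curp[0] raises IndexError
    | some r =>
    match PySem.List.pyGet? curp 1 with
    | none => none   -- curp[1] raises IndexError
    | some c =>
      let vertical := direc = 0 ∨ direc = 1
      let laneO : Option (List Char) :=
        if vertical then road.mapM (fun row => PySem.Str.pyGet? row c)   -- ''.join(row[c] for row in road)
        else (PySem.List.pyGet? road r).map String.toList                -- road[r]
      match laneO with
      | none => none   -- IndexError while building the lane
      | some lane0 =>
        let pos0 : Int := if vertical then r else c
        let backward := direc = 0 ∨ direc = 2
        let lane := if backward then lane0.reverse else lane0            -- lane[::-1]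
        let pos : Int := if backward then (lane0.length : Int) - 1 - pos0 else pos0
        let i := PySem.Chars.findFrom lane ['#'] pos none                -- lane.find('#', pos)
        let last : Int := (if i = -1 then (lane.length : Int) else i) - 1
        let last2 : Int := if backward then (lane.length : Int) - 1 - last else last
        some (if vertical then [last2, c] else [r, last2])
  else none

-- ===== PRECONDITION & SPEC =====
-- Pre_ restricts to the function's natural domain: curp supplies two coordinates and, for a valid
-- direction, the grid is rectangular (all rows the same length) with the start cell inside it;
-- outside it A raises or returns accidental values of Python's negative-index wraparound / ragged rows.
def Pre_goroad (road : List String) (curp : List Int) (direc : Int) : Prop :=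
  2 ≤ curp.length ∧
  ((direc = 0 ∨ direc = 1 ∨ direc = 2 ∨ direc = 3) →
    (∀ s ∈ road, s.toList.length = (road.headD "").toList.length) ∧
    0 ≤ curp.getD 0 0 ∧ curp.getD 0 0 < (road.length : Int) ∧
    0 ≤ curp.getD 1 0 ∧ curp.getD 1 0 < ((road.headD "").toList.length : Int))
instance (road : List String) (curp : List Int) (direc : Int) : Decidable (Pre_goroad road curp direc) := by unfold Pre_goroad; infer_instance

def pvWitness_goroad : List String × List Int × Int := (["#"], [0, 0], 1)

def Spec_goroad (road : List String) (curp : List Int) (direc : Int) (out : Option (List Int)) : Prop := out = goroad_alt road curp direc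
instance (road : List String) (curp : List Int) (direc : Int) (out : Option (List Int)) : Decidable (Spec_goroad road curp direc out) := by unfold Spec_goroad; infer_instance

-- ===== CLAIM (what is proved, stated in full; the proofs are below) =====
def Claim_equal_goroad : Prop := ∀ (road : List String) (curp : List Int) (direc : Int), Dom_goroad road curp direc → Pre_goroad road curp direc → Spec_goroad road curp direc (goroad road curp direc)

-- ===== LEMMAS AND PROOFS =====

-- where A's loops stop in a lane read forward from position p: the first wall at index ≥ p, or the end
def StopsAt (lane : List Char) (p j : Nat) : Prop :=
  p ≤ j ∧ j ≤ lane.length ∧ (j < lane.length → lane[j]? = some '#') ∧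
  ∀ i : Nat, p ≤ i → i < j → lane[i]? ≠ some '#'

theorem singleton_hash_prefix (l : List Char) (i : Nat) :
    (['#'] <+: l.drop i) ↔ l[i]? = some '#' := by
  rw [← List.head?_drop]
  cases l.drop i with
  | nil => simp
  | cons a t => simp [List.cons_prefix_iff]

theorem stops_eq_find (lane : List Char) (p j : Nat) (hp : p ≤ lane.length)
    (h : StopsAt lane p j) :
    (if PySem.Chars.findFrom lane ['#'] (p : Int) none = -1 then (lane.length : Int)
     else PySem.Chars.findFrom lane ['#'] (p : Int) none) = (j : Int) := by
  obtain ⟨hpj, hjl, hhash, hmin⟩ := h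
  by_cases hF : PySem.Chars.findFrom lane ['#'] (p : Int) none = -1
  · rw [if_pos hF]
    have hno : ¬ (['#'] <:+: lane.drop p) :=
      (PySem.Chars.findFrom_natCast_eq_neg_one_iff lane ['#'] p hp).mp hF
    have : j = lane.length := by
      by_contra hne
      have hjlt : j < lane.length := lt_of_le_of_ne hjl hne
      have : ['#'] <:+: lane.drop p := by
        rw [List.singleton_infix_iff]
        have := hhash hjlt
        have : lane[j] = '#' := by
          simpa [List.getElem?_eq_getElem hjlt] using hhash hjlt
        have hmem : '#' ∈ lane.drop p := by
          rw [← this]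
          exact List.mem_iff_getElem.mpr ⟨j - p, by simp; omega,
            by rw [List.getElem_drop]; congr 1; omega⟩
        exact hmem
      exact hno this
    omega
  · rw [if_neg hF]
    obtain ⟨hge, hpref, hfirst⟩ := PySem.Chars.findFrom_natCast_spec lane ['#'] p hp hF
    set F := PySem.Chars.findFrom lane ['#'] (p : Int) none with hFdef
    have hF0 : 0 ≤ F := le_trans (by positivity) hge
    have hFhash : lane[F.toNat]? = some '#' := (singleton_hash_prefix lane F.toNat).mp hpref
    have hFlt : F.toNat < lane.length := by
      by_contra hc
      rw [List.getElem?_eq_none (by omega)] at hFhash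
      simp at hFhash
    -- j ≤ F: indices in [p, j) are not '#', but F is
    have h1 : j ≤ F.toNat := by
      by_contra hc
      exact hmin F.toNat (by omega) (by omega) hFhash
    -- F ≤ j: indices in [p, F) are not '#', but j is if j < len
    have h2 : F.toNat ≤ j := by
      by_contra hc
      have hjlt : j < lane.length := by omega
      have := hfirst j hpj (by omega)
      rw [singleton_hash_prefix] at this
      exact this (hhash hjlt)
    omega

-- the column of road at a valid index c of a rectangular grid, as produced by B's mapM
theorem column_eq (road : List String) (c : Int) (w : Nat)
    (hw : ∀ s ∈ road, s.toList.length = w) (hc0 : 0 ≤ c) (hc1 : c < (w : Int)) :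
    road.mapM (fun row => PySem.Str.pyGet? row c) =
      some (road.map (fun row => row.toList.getD c.toNat ' ')) := by
  induction road with
  | nil => rfl
  | cons s t ih =>
    have hs : s.toList.length = w := hw s (by simp)
    have hget : PySem.Str.pyGet? s c = some (s.toList.getD c.toNat ' ') := by
      have hcn : c = (c.toNat : Int) := by omega
      rw [hcn, PySem.Str.pyGet?_natCast]
      rw [List.getElem?_eq_getElem (by omega), List.getD_eq_getElem _ _ (by omega)]
      congr 2
    rw [List.mapM_cons, hget, ih (fun r hr => hw r (by simp [hr]))]
    rfl

-- the cells A reads down a column are the entries of B's column lane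
theorem cell_column (road : List String) (c : Int) (w : Nat)
    (hw : ∀ s ∈ road, s.toList.length = w) (hc0 : 0 ≤ c) (hc1 : c < (w : Int))
    (l : Int) (hl0 : 0 ≤ l) (hl1 : l < (road.length : Int)) :
    cell road l c = (road.map (fun row => row.toList.getD c.toNat ' '))[l.toNat]? := by
  have hlen : l.toNat < road.length := by omega
  have h1 : PySem.List.pyGet? road l = some road[l.toNat] :=
    PySem.List.pyGet?_eq_some_getElem road hl0 (by exact_mod_cast hl1)
  have hrow : (road[l.toNat]).toList.length = w := hw _ (List.getElem_mem hlen)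
  have hcn : c = (c.toNat : Int) := by omega
  have h2 : PySem.Str.pyGet? road[l.toNat] c = some ((road[l.toNat]).toList.getD c.toNat ' ') := by
    rw [hcn, PySem.Str.pyGet?_natCast]
    rw [List.getElem?_eq_getElem (by omega), List.getD_eq_getElem _ _ (by omega)]
    congr 2
  rw [cell, h1, Option.bind_some, h2, List.getElem?_map,
    List.getElem?_eq_getElem hlen]
  rfl

-- the cells A reads along a row are the entries of that row
theorem cell_row (road : List String) (l : Int) (hl0 : 0 ≤ l) (hl1 : l < (road.length : Int))
    (r : Int) (hr0 : 0 ≤ r) :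
    cell road l r = ((road[l.toNat]'(by omega)).toList)[r.toNat]? := by
  have h1 : PySem.List.pyGet? road l = some road[l.toNat] :=
    PySem.List.pyGet?_eq_some_getElem road hl0 (by exact_mod_cast hl1)
  have hrn : r = (r.toNat : Int) := by omega
  rw [cell, h1, Option.bind_some, hrn, PySem.Str.pyGet?_natCast]
  congr 1

-- A's downward loop stops at the first wall below (or at) l, or at rows
theorem goDown_stops (road : List String) (lane : List Char) (c : Int)
    (hlen : lane.length = road.length)
    (hcell : ∀ l : Int, 0 ≤ l → l < (road.length : Int) → cell road l c = lane[l.toNat]?) :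
    ∀ (fuel : Nat) (l : Int), 0 ≤ l → l ≤ (road.length : Int) → ((road.length : Int) - l).toNat < fuel →
    ∃ x : Int, goDownA road (road.length : Int) c fuel l = some x ∧ l ≤ x ∧
      StopsAt lane l.toNat x.toNat := by
  intro fuel
  induction fuel with
  | zero => intro l _ _ h; omega
  | succ fuel ih =>
    intro l hl0 hl1 hfuel
    by_cases hlt : l < (road.length : Int)
    · have hc := hcell l hl0 hlt
      have hsome : lane[l.toNat]? = some (lane[l.toNat]'(by omega)) :=
        List.getElem?_eq_getElem (by omega)
      by_cases hsh : lane[l.toNat]'(by omega) = '#'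
      · refine ⟨l, ?_, le_refl l, le_refl _, by omega, ?_, ?_⟩
        · rw [goDownA, if_pos hlt, hc, hsome]; simp [hsh]
        · intro _; rw [hsome, hsh]
        · intro i h1 h2; omega
      · obtain ⟨x, hx, hlx, hs1, hs2, hs3, hs4⟩ :=
          ih (l + 1) (by omega) (by omega) (by omega)
        refine ⟨x, ?_, by omega, by omega, hs2, hs3, ?_⟩
        · rw [goDownA, if_pos hlt, hc, hsome]
          simp only [hsh, if_false]
          exact hx
        · intro i h1 h2
          by_cases hi : i = l.toNat
          · subst hi; rw [hsome]; simp [hsh]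
          · exact hs4 i (by omega) h2
    · exact ⟨l, by rw [goDownA, if_neg hlt], le_refl l, by omega, by omega,
        by intro h; omega, by intro i h1 h2; omega⟩

-- A's rightward loop stops at the first wall right of (or at) r, or at the row's end
theorem goRight_stops (road : List String) (lane : List Char) (l : Int)
    (hl0 : 0 ≤ l) (hl1 : l < (road.length : Int))
    (hlane : lane = (road[l.toNat]'(by omega)).toList) :
    ∀ (fuel : Nat) (r : Int), 0 ≤ r → r ≤ (lane.length : Int) → ((lane.length : Int) - r).toNat < fuel →
    ∃ x : Int, goRightA road (lane.length : Int) l fuel r = some x ∧ r ≤ x ∧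
      StopsAt lane r.toNat x.toNat := by
  intro fuel
  induction fuel with
  | zero => intro r _ _ h; omega
  | succ fuel ih =>
    intro r hr0 hr1 hfuel
    by_cases hlt : r < (lane.length : Int)
    · have hc : cell road l r = lane[r.toNat]? := by
        rw [cell_row road l hl0 hl1 r hr0, hlane]
      have hsome : lane[r.toNat]? = some (lane[r.toNat]'(by omega)) :=
        List.getElem?_eq_getElem (by omega)
      by_cases hsh : lane[r.toNat]'(by omega) = '#'
      · refine ⟨r, ?_, le_refl r, le_refl _, by omega, ?_, ?_⟩
        · rw [goRightA, if_pos hlt, hc, hsome]; simp [hsh]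
        · intro _; rw [hsome, hsh]
        · intro i h1 h2; omega
      · obtain ⟨x, hx, hrx, hs1, hs2, hs3, hs4⟩ :=
          ih (r + 1) (by omega) (by omega) (by omega)
        refine ⟨x, ?_, by omega, by omega, hs2, hs3, ?_⟩
        · rw [goRightA, if_pos hlt, hc, hsome]
          simp only [hsh, if_false]
          exact hx
        · intro i h1 h2
          by_cases hi : i = r.toNat
          · subst hi; rw [hsome]; simp [hsh]
          · exact hs4 i (by omega) h2
    · exact ⟨r, by rw [goRightA, if_neg hlt], le_refl r, by omega, by omega,
        by intro h; omega, by intro i h1 h2; omega⟩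

-- A's upward loop, read in the REVERSED lane, stops like a forward loop from length-1-l
theorem goUp_stops (road : List String) (lane : List Char) (c : Int)
    (hlen : lane.length = road.length)
    (hcell : ∀ l : Int, 0 ≤ l → l < (road.length : Int) → cell road l c = lane[l.toNat]?) :
    ∀ (fuel : Nat) (l : Int), -1 ≤ l → l < (road.length : Int) → (l + 1).toNat < fuel →
    ∃ x : Int, goUpA road c fuel l = some x ∧ -1 ≤ x ∧ x ≤ l ∧
      StopsAt lane.reverse ((lane.length : Int) - 1 - l).toNat ((lane.length : Int) - 1 - x).toNat := by
  intro fuel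
  induction fuel with
  | zero => intro l _ _ h; omega
  | succ fuel ih =>
    intro l hm1 hl1 hfuel
    by_cases hge : 0 ≤ l
    · have hc := hcell l hge hl1
      have hln : l.toNat < lane.length := by omega
      have hsome : lane[l.toNat]? = some (lane[l.toNat]'hln) :=
        List.getElem?_eq_getElem hln
      have hrevj : ∀ i : Nat, i < lane.length →
          lane.reverse[lane.length - 1 - i]? = lane[i]? := by
        intro i hi
        rw [List.getElem?_reverse (by omega)]
        congr 1; omega
      by_cases hsh : lane[l.toNat]'hln = '#'
      · refine ⟨l, ?_, by omega, le_refl l, ?_⟩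
        · rw [goUpA, if_pos hge, hc, hsome]; simp [hsh]
        · have hpj : ((lane.length : Int) - 1 - l).toNat = lane.length - 1 - l.toNat := by omega
          refine ⟨le_refl _, by simp; omega, ?_, by intro i h1 h2; omega⟩
          intro _
          rw [hpj, hrevj l.toNat hln, hsome, hsh]
      · obtain ⟨x, hx, hx1, hx2, hs1, hs2, hs3, hs4⟩ :=
          ih (l - 1) (by omega) (by omega) (by omega)
        refine ⟨x, ?_, hx1, by omega, ?_, ?_, ?_, ?_⟩
        · rw [goUpA, if_pos hge, hc, hsome]
          simp only [hsh, if_false]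
          exact hx
        · omega
        · simpa using by simpa using hs2
        · exact hs3
        · intro i h1 h2
          by_cases hi : i = lane.length - 1 - l.toNat
          · subst hi
            rw [hrevj l.toNat hln, hsome]
            simp [hsh]
          · exact hs4 i (by omega) h2
    · have hl : l = -1 := by omega
      subst hl
      refine ⟨-1, by rw [goUpA]; norm_num, by omega, le_refl _, ?_⟩
      exact ⟨le_refl _, by simp only [List.length_reverse]; omega,
        by intro h; simp only [List.length_reverse] at h; omega,
        by intro i h1 h2; omega⟩

-- A's leftward loop, read in the REVERSED lane, stops like a forward loop from length-1-r
theorem goLeft_stops (road : List String) (lane : List Char) (l : Int)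
    (hl0 : 0 ≤ l) (hl1 : l < (road.length : Int))
    (hlane : lane = (road[l.toNat]'(by omega)).toList) :
    ∀ (fuel : Nat) (r : Int), -1 ≤ r → r < (lane.length : Int) → (r + 1).toNat < fuel →
    ∃ x : Int, goLeftA road l fuel r = some x ∧ -1 ≤ x ∧ x ≤ r ∧
      StopsAt lane.reverse ((lane.length : Int) - 1 - r).toNat ((lane.length : Int) - 1 - x).toNat := by
  intro fuel
  induction fuel with
  | zero => intro r _ _ h; omega
  | succ fuel ih =>
    intro r hm1 hr1 hfuel
    by_cases hge : 0 ≤ r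
    · have hc : cell road l r = lane[r.toNat]? := by
        rw [cell_row road l hl0 hl1 r hge, hlane]
      have hrn : r.toNat < lane.length := by omega
      have hsome : lane[r.toNat]? = some (lane[r.toNat]'hrn) :=
        List.getElem?_eq_getElem hrn
      have hrevj : ∀ i : Nat, i < lane.length →
          lane.reverse[lane.length - 1 - i]? = lane[i]? := by
        intro i hi
        rw [List.getElem?_reverse (by omega)]
        congr 1; omega
      by_cases hsh : lane[r.toNat]'hrn = '#'
      · refine ⟨r, ?_, by omega, le_refl r, ?_⟩
        · rw [goLeftA, if_pos hge, hc, hsome]; simp [hsh]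
        · have hpj : ((lane.length : Int) - 1 - r).toNat = lane.length - 1 - r.toNat := by omega
          refine ⟨le_refl _, by simp; omega, ?_, by intro i h1 h2; omega⟩
          intro _
          rw [hpj, hrevj r.toNat hrn, hsome, hsh]
      · obtain ⟨x, hx, hx1, hx2, hs1, hs2, hs3, hs4⟩ :=
          ih (r - 1) (by omega) (by omega) (by omega)
        refine ⟨x, ?_, hx1, by omega, ?_, ?_, ?_, ?_⟩
        · rw [goLeftA, if_pos hge, hc, hsome]
          simp only [hsh, if_false]
          exact hx
        · omega
        · simpa using by simpa using hs2
        · exact hs3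
        · intro i h1 h2
          by_cases hi : i = lane.length - 1 - r.toNat
          · subst hi
            rw [hrevj r.toNat hrn, hsome]
            simp [hsh]
          · exact hs4 i (by omega) h2
    · have hr : r = -1 := by omega
      subst hr
      refine ⟨-1, by rw [goLeftA]; norm_num, by omega, le_refl _, ?_⟩
      exact ⟨le_refl _, by simp only [List.length_reverse]; omega,
        by intro h; simp only [List.length_reverse] at h; omega,
        by intro i h1 h2; omega⟩

-- ===== VERDICT (by name: the statement is the Claim_ definition above) =====
theorem goroad_spec : Claim_equal_goroad := by
  intro road curp direc hdom hpre
  obtain ⟨hlen2, hval⟩ := hpre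
  unfold Spec_goroad
  match curp, hlen2 with
  | a :: b :: t, _ =>
    have hga : PySem.List.pyGet? (a :: b :: t) 0 = some a :=
      PySem.List.pyGet?_zero_cons a (b :: t)
    have hgb : PySem.List.pyGet? (a :: b :: t) 1 = some b := by
      simp [PySem.List.pyGet?, PySem.List.pyIdx?]
    by_cases h1 : direc = 1
    · subst h1
      obtain ⟨hu, ha0, ha1, hb0, hb1⟩ := hval (by norm_num)
      simp only [List.getD, List.getElem?_cons_zero, List.getElem?_cons_succ, Option.getD_some] at ha0 ha1 hb0 hb1
      set w := (road.headD "").toList.length with hw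
      set lane := road.map (fun row => row.toList.getD b.toNat ' ') with hlane
      have hcol := column_eq road b w hu hb0 hb1
      have hlanelen : lane.length = road.length := by simp [hlane]
      have hcell : ∀ l : Int, 0 ≤ l → l < (road.length : Int) → cell road l b = lane[l.toNat]? :=
        fun l h0 h2 => cell_column road b w hu hb0 hb1 l h0 h2
      obtain ⟨x, hx, hax, hstop⟩ := goDown_stops road lane b hlanelen hcell
        (((road.length : Int) - a).toNat + 1) a ha0 (by omega) (by omega)
      have hfind := stops_eq_find lane a.toNat x.toNat (by omega) hstop
      have hca : (a : Int) = ((a.toNat : Nat) : Int) := by omega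
      have hcx : ((x.toNat : Nat) : Int) = x := by omega
      rw [hcx] at hfind
      have hcol' : List.mapM (fun row => PySem.List.pyGet? row.toList b) road = some lane := by
        simpa using hcol
      simp only [goroad, goroad_alt, hga, hgb]
      norm_num
      rw [hx, hca]
      simp only [hcol', Option.map_some]
      rw [hfind]
    · by_cases h0 : direc = 0
      · subst h0
        obtain ⟨hu, ha0, ha1, hb0, hb1⟩ := hval (by norm_num)
        simp only [List.getD, List.getElem?_cons_zero, List.getElem?_cons_succ, Option.getD_some] at ha0 ha1 hb0 hb1
        set w := (road.headD "").toList.length with hw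
        set lane := road.map (fun row => row.toList.getD b.toNat ' ') with hlane
        have hcol := column_eq road b w hu hb0 hb1
        have hlanelen : lane.length = road.length := by simp [hlane]
        have hcell : ∀ l : Int, 0 ≤ l → l < (road.length : Int) → cell road l b = lane[l.toNat]? :=
          fun l h0 h2 => cell_column road b w hu hb0 hb1 l h0 h2
        obtain ⟨x, hx, hxm1, hxa, hstop⟩ := goUp_stops road lane b hlanelen hcell
          ((a + 1).toNat + 1) a (by omega) ha1 (by omega)
        have hfind := stops_eq_find lane.reverse (((lane.length : Int) - 1 - a).toNat)
          (((lane.length : Int) - 1 - x).toNat)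
          (by simp only [List.length_reverse]; omega) hstop
        have hj : (((((lane.length : Int) - 1 - x).toNat : Nat)) : Int) = (lane.length : Int) - 1 - x := by omega
        rw [hj] at hfind
        have hcol' : List.mapM (fun row => PySem.List.pyGet? row.toList b) road = some lane := by
          simp at hcol
          exact hcol
        have hcp : ((lane.length : Int) - 1 - a) = (((((lane.length : Int) - 1 - a).toNat : Nat)) : Int) := by omega
        simp only [goroad, goroad_alt, hga, hgb]
        norm_num
        rw [hx]
        simp only [hcol', Option.map_some]
        rw [hcp]
        simp only [List.length_reverse] at hfind
        rw [hfind]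
        have hfin : (lane.length : Int) - ((lane.length : Int) - 1 - x) = x + 1 := by omega
        rw [hfin]
      · by_cases h2 : direc = 2
        · subst h2
          obtain ⟨hu, ha0, ha1, hb0, hb1⟩ := hval (by norm_num)
          simp only [List.getD, List.getElem?_cons_zero, List.getElem?_cons_succ, Option.getD_some] at ha0 ha1 hb0 hb1
          set lane := (road[a.toNat]'(by omega)).toList with hlane
          have hlw : lane.length = (road.headD "").toList.length :=
            hu _ (List.getElem_mem (by omega))
          have hrow : PySem.List.pyGet? road a = some (road[a.toNat]'(by omega)) :=
            PySem.List.pyGet?_eq_some_getElem road ha0 (by omega)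
          obtain ⟨x, hx, hxm1, hxb, hstop⟩ := goLeft_stops road lane a ha0 ha1 rfl
            ((b + 1).toNat + 1) b (by omega) (by omega) (by omega)
          have hfind := stops_eq_find lane.reverse (((lane.length : Int) - 1 - b).toNat)
            (((lane.length : Int) - 1 - x).toNat)
            (by simp only [List.length_reverse]; omega) hstop
          have hj : (((((lane.length : Int) - 1 - x).toNat : Nat)) : Int) = (lane.length : Int) - 1 - x := by omega
          rw [hj] at hfind
          have hcp : ((lane.length : Int) - 1 - b) = (((((lane.length : Int) - 1 - b).toNat : Nat)) : Int) := by omega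
          simp only [goroad, goroad_alt, hga, hgb]
          norm_num
          rw [hx]
          simp only [hrow, Option.map_some]
          rw [hcp]
          simp only [List.length_reverse] at hfind
          rw [hfind]
          have hfin : (lane.length : Int) - ((lane.length : Int) - 1 - x) = x + 1 := by omega
          rw [hfin]
        · by_cases h3 : direc = 3
          · subst h3
            obtain ⟨hu, ha0, ha1, hb0, hb1⟩ := hval (by norm_num)
            simp only [List.getD, List.getElem?_cons_zero, List.getElem?_cons_succ, Option.getD_some] at ha0 ha1 hb0 hb1
            rcases road with _ | ⟨r0, rs⟩
            · exfalso; simp at ha1; omega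
            set lane := ((r0 :: rs)[a.toNat]'(by omega)).toList with hlane
            have hlw : lane.length = r0.toList.length :=
              hu _ (List.getElem_mem (by omega))
            have hrow : PySem.List.pyGet? (r0 :: rs) a = some ((r0 :: rs)[a.toNat]'(by omega)) :=
              PySem.List.pyGet?_eq_some_getElem (r0 :: rs) ha0 (by omega)
            have hb1' : b < (lane.length : Int) := by
              simp only [List.headD_cons] at hb1; omega
            obtain ⟨x, hx, hbx, hstop⟩ := goRight_stops (r0 :: rs) lane a ha0 ha1 rfl
              (((lane.length : Int) - b).toNat + 1) b hb0 (by omega) (by omega)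
            have hfind := stops_eq_find lane b.toNat x.toNat (by omega) hstop
            have hcb : (b : Int) = ((b.toNat : Nat) : Int) := by omega
            have hcx : ((x.toNat : Nat) : Int) = x := by omega
            rw [hcx] at hfind
            have hcols : (r0.length : Int) = (lane.length : Int) := by
              rw [← String.length_toList]; omega
            simp only [goroad, goroad_alt, hga, hgb]
            norm_num
            rw [hcols, hx, hcb]
            simp only [hrow, Option.map_some]
            rw [hfind]
          · have hnot : ¬ (direc = 0 ∨ direc = 1 ∨ direc = 2 ∨ direc = 3) := by
              intro h; rcases h with h | h | h | h <;> [exact h0 h; exact h1 h; exact h2 h; exact h3 h]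
            simp only [goroad, goroad_alt, hga, hgb, if_neg h2, if_neg h3, if_neg h0, if_neg h1, if_neg hnot]
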